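-- pv_equiv track=rewrite | github.com/arturmrowca/bayspec | network/tscbn_structure_model.py | _self_dependencies
-- ===== SOURCE A (Python) =====
-- def _self_dependencies(vertices, rel_nodes):
--     try:
--         edges = []
--         verts = sorted(vertices)
--         fr = verts[0]
--
--         for v in verts[1:]:
--             to = v
--             fst = fr.split("_")[0]  # ''.join([i for i in fr if not i.isdigit()])
--             if fst == to.split("_")[0] and fst in rel_nodes:
--                 edges.append([fr, to])
--             fr = to
--         return edges
--     except:
--         return []
-- ===== SOURCE B (Python) =====
-- def _self_dependencies(vertices, rel_nodes):
--     # Phase 1: partition the sorted vertices into maximal runs of equal prefix.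
--     groups = []
--     for v in sorted(vertices):
--         if groups and groups[-1][0].split("_")[0] == v.split("_")[0]:
--             groups[-1].append(v)
--         else:
--             groups.append([v])
--     # Phase 2: for each relevant group, emit every consecutive pair.
--     edges = []
--     for g in groups:
--         if g[0].split("_")[0] in rel_nodes:
--             edges.extend([a, b] for a, b in zip(g, g[1:]))
--     return edges
-- ===== Notes on version B (the rewrite author's own statement) =====
-- stated objective: alternative
-- what changed: Replaced the single pass with a rolling 'fr' pointer and a per-step prefix comparison by a two-phase decomposition: first group the sorted vertices into maximal same-prefix runs, then emit consecutive pairs (zip of each run with its tail) only for runs whose prefix is in rel_nodes; the try/except for empty input disappears because grouping an empty list naturally yields no edges.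
import Mathlib
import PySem

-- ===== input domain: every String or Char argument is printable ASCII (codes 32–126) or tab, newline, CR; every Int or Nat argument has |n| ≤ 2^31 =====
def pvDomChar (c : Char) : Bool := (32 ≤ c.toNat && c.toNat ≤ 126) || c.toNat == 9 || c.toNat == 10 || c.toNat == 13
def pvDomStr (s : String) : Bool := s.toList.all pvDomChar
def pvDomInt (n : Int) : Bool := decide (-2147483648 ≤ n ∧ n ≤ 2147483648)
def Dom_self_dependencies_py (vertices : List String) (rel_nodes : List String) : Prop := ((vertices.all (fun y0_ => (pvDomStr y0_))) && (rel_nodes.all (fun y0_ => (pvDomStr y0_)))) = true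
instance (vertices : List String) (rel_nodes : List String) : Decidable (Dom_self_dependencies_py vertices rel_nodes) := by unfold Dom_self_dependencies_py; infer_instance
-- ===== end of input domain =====

-- ===== PORT A =====
-- B changes A's rolling-pointer single pass into group-then-pair two phases ('alternative'); proved equal on all inputs.
-- shared key expression: v.split("_")[0] — split? is some for the nonempty separator "_" and its result is
-- never empty, so the getD/headD defaults are never reached (exact).
def pvKey (s : String) : String := ((PySem.Str.split? s "_").getD []).headD ""

-- A's for-loop: fr is the rolling previous vertex, edges appended in order
def pvALoop (rel_nodes : List String) (fr : String) : List String → List (List String)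
  | [] => []
  | to_ :: rest =>
    (if pvKey fr = pvKey to_ ∧ rel_nodes.contains (pvKey fr) then [[fr, to_]] else []) ++
      pvALoop rel_nodes to_ rest

def self_dependencies_py (vertices : List String) (rel_nodes : List String) : List (List String) :=
  match PySem.List.sorted vertices (fun s => s) false with
  | [] => []                      -- verts[0] raises IndexError; the bare except returns []
  | fr :: rest => pvALoop rel_nodes fr rest

-- ===== PORT B =====
-- one step of B's first for-loop: extend the last group or open a new one
def pvBStep (groups : List (List String)) (v : String) : List (List String) :=
  match groups.getLast? with
  | some g => if pvKey (g.headD "") = pvKey v then groups.dropLast ++ [g ++ [v]] else groups ++ [[v]]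
  | none => [[v]]

-- [[a, b] for a, b in zip(g, g[1:])]
def pvPairs : List String → List (List String)
  | a :: b :: rest => [a, b] :: pvPairs (b :: rest)
  | _ => []

def self_dependencies_py_alt (vertices : List String) (rel_nodes : List String) : List (List String) :=
  ((PySem.List.sorted vertices (fun s => s) false).foldl pvBStep []).flatMap
    (fun g => if rel_nodes.contains (pvKey (g.headD "")) then pvPairs g else [])

-- ===== PRECONDITION & SPEC =====
def Spec_self_dependencies_py (vertices : List String) (rel_nodes : List String) (out : List (List String)) : Prop := out = self_dependencies_py_alt vertices rel_nodes
instance (vertices : List String) (rel_nodes : List String) (out : List (List String)) : Decidable (Spec_self_dependencies_py vertices rel_nodes out) := by unfold Spec_self_dependencies_py; infer_instance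

-- ===== CLAIM (what is proved, stated in full; the proofs are below) =====
def Claim_equal_self_dependencies_py : Prop := ∀ (vertices : List String) (rel_nodes : List String), Dom_self_dependencies_py vertices rel_nodes → Spec_self_dependencies_py vertices rel_nodes (self_dependencies_py vertices rel_nodes)

-- ===== LEMMAS AND PROOFS =====

-- right-recursive view of B's grouping loop: current group is h :: t (head h fixed), key compared against pvKey h
def pvGrp (h : String) (t : List String) : List String → List (List String)
  | [] => [h :: t]
  | v :: vs => if pvKey h = pvKey v then pvGrp h (t ++ [v]) vs else (h :: t) :: pvGrp v [] vs

theorem foldl_pvBStep_eq_pvGrp (vs : List String) : ∀ (A : List (List String)) (h : String) (t : List String),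
    List.foldl pvBStep (A ++ [h :: t]) vs = A ++ pvGrp h t vs := by
  induction vs with
  | nil => intro A h t; simp [pvGrp]
  | cons v vs ih =>
    intro A h t
    have hstep : pvBStep (A ++ [h :: t]) v =
        if pvKey h = pvKey v then A ++ [h :: (t ++ [v])] else (A ++ [h :: t]) ++ [[v]] := by
      simp [pvBStep]
    by_cases hk : pvKey h = pvKey v
    · rw [List.foldl_cons, hstep, if_pos hk, ih A h (t ++ [v]), pvGrp, if_pos hk]
    · rw [List.foldl_cons, hstep, if_neg hk, ih (A ++ [h :: t]) v [], pvGrp, if_neg hk,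
        List.append_assoc, List.singleton_append]

theorem pvPairs_concat : ∀ (t : List String) (h v : String),
    pvPairs ((h :: t) ++ [v]) = pvPairs (h :: t) ++ [[t.getLastD h, v]] := by
  intro t
  induction t with
  | nil => intro h v; rfl
  | cons a t ih =>
    intro h v
    calc pvPairs ((h :: a :: t) ++ [v])
        = [h, a] :: pvPairs ((a :: t) ++ [v]) := rfl
      _ = [h, a] :: (pvPairs (a :: t) ++ [[t.getLastD a, v]]) := by rw [ih a v]
      _ = pvPairs (h :: a :: t) ++ [[(a :: t).getLastD h, v]] := by rw [List.getLastD_cons]; rfl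

theorem pvKey_getLastD : ∀ (t : List String) (h : String),
    (∀ x ∈ t, pvKey x = pvKey h) → pvKey (t.getLastD h) = pvKey h := by
  intro t
  induction t with
  | nil => intro h _; rfl
  | cons a t ih =>
    intro h hyp
    have ha : pvKey a = pvKey h := hyp a (by simp)
    rw [List.getLastD_cons, ih a (fun x hx => by rw [hyp x (by simp [hx]), ha]), ha]

theorem pvGrp_flatMap (rel : List String) : ∀ (vs : List String) (h : String) (t : List String),
    (∀ x ∈ t, pvKey x = pvKey h) →
    (pvGrp h t vs).flatMap (fun g => if rel.contains (pvKey (g.headD "")) then pvPairs g else [])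
      = (if rel.contains (pvKey h) then pvPairs (h :: t) else []) ++ pvALoop rel (t.getLastD h) vs := by
  intro vs
  induction vs with
  | nil => intro h t _; simp [pvGrp, pvALoop]
  | cons v vs ih =>
    intro h t hyp
    have hL : pvKey (t.getLastD h) = pvKey h := pvKey_getLastD t h hyp
    have hunf : pvALoop rel (t.getLastD h) (v :: vs) =
        (if pvKey (t.getLastD h) = pvKey v ∧ rel.contains (pvKey (t.getLastD h))
          then [[t.getLastD h, v]] else []) ++ pvALoop rel v vs := rfl
    by_cases hk : pvKey h = pvKey v
    · have hyp' : ∀ x ∈ t ++ [v], pvKey x = pvKey h := by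
        intro x hx
        rcases List.mem_append.mp hx with hx | hx
        · exact hyp x hx
        · simp only [List.mem_singleton] at hx; rw [hx, ← hk]
      have hlast : (t ++ [v]).getLastD h = v := by
        simp [List.getLastD_eq_getLast?]
      have hp : pvPairs (h :: (t ++ [v])) = pvPairs (h :: t) ++ [[t.getLastD h, v]] := by
        simpa using pvPairs_concat t h v
      rw [pvGrp, if_pos hk, ih h (t ++ [v]) hyp', hlast, hunf, hp, hL, hk]
      split_ifs with h1 h2 h3
      · simp
      · exact absurd ⟨rfl, h1⟩ h2
      · exact absurd h3.2 h1
      · simp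
    · have hrec : (pvGrp v [] vs).flatMap
          (fun g => if rel.contains (pvKey (g.headD "")) then pvPairs g else [])
          = pvALoop rel v vs := by
        rw [ih v [] (by simp)]; simp [pvPairs]
      have hcond : ¬(pvKey (t.getLastD h) = pvKey v ∧ rel.contains (pvKey (t.getLastD h)) = true) :=
        fun hcon => hk (hL.symm.trans hcon.1)
      rw [pvGrp, if_neg hk, List.flatMap_cons, hrec, hunf, if_neg hcond]
      simp

-- ===== VERDICT (by name: the statement is the Claim_ definition above) =====
theorem self_dependencies_py_spec : Claim_equal_self_dependencies_py := by
  intro vertices rel_nodes _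
  unfold Spec_self_dependencies_py self_dependencies_py self_dependencies_py_alt
  cases hs : PySem.List.sorted vertices (fun s => s) false with
  | nil => simp
  | cons fr rest =>
    have h1 : List.foldl pvBStep [] (fr :: rest) = pvGrp fr [] rest := by
      have : pvBStep [] fr = [] ++ [fr :: []] := by simp [pvBStep]
      rw [List.foldl_cons, this, foldl_pvBStep_eq_pvGrp rest [] fr []]
      simp
    rw [h1, pvGrp_flatMap rel_nodes rest fr [] (by simp)]
    simp [pvPairs]
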